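-- pv_equiv track=rewrite | github.com/De7vID/klingon-assistant-data | build/definition_parser.py | extract_trailing_parenthetical
-- ===== SOURCE A (Python) =====
-- from typing import List, Optional, Tuple
--
-- def extract_trailing_parenthetical(text: str) -> Tuple[str, Optional[str]]:
--     """
--     Extract trailing parenthetical from text.
--     Returns (text_without_parens, parenthetical_content) or (text, None).
--     """
--     text = text.strip()
--     if not text.endswith(')'):
--         return text, None
--
--     # Find matching opening paren
--     depth = 0
--     for i in range(len(text) - 1, -1, -1):
--         if text[i] == ')':
--             depth += 1
--         elif text[i] == '(':
--             depth -= 1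
--             if depth == 0:
--                 # Found the matching paren
--                 before = text[:i].strip()
--                 inside = text[i+1:-1].strip()
--                 return before, inside
--
--     return text, None
-- ===== SOURCE B (Python) =====
-- from typing import List, Optional, Tuple
--
-- def extract_trailing_parenthetical(text: str) -> Tuple[str, Optional[str]]:
--     """
--     Extract trailing parenthetical from text.
--     Returns (text_without_parens, parenthetical_content) or (text, None).
--     """
--     text = text.strip()
--     if not text.endswith(')'):
--         return text, None
--
--     # Forward scan: maintain a stack of indices of unmatched '(' in text[:-1];
--     # the final ')' matches the last unmatched '(' (the stack top), if any.
--     stack: List[int] = []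
--     for i, ch in enumerate(text[:-1]):
--         if ch == '(':
--             stack.append(i)
--         elif ch == ')' and stack:
--             stack.pop()
--     if not stack:
--         return text, None
--     i = stack[-1]
--     return text[:i].strip(), text[i+1:-1].strip()
-- ===== Notes on version B (the rewrite author's own statement) =====
-- stated objective: alternative
-- what changed: Replaces A's backward depth-counting scan from the end of the string with a single forward left-to-right pass maintaining a stack of indices of unmatched opening parentheses; the trailing close parenthesis matches the stack top (the last unmatched open), if any.
import Mathlib
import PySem

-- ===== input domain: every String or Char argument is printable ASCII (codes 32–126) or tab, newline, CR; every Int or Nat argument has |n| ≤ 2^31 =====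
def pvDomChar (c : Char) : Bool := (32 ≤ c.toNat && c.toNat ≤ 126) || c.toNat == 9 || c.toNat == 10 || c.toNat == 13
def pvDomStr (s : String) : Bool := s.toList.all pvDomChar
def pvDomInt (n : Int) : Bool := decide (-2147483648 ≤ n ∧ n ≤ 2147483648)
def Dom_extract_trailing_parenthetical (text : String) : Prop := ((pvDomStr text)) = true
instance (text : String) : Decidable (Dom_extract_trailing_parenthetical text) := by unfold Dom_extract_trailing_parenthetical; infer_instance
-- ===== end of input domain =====

-- B replaces A's backward depth-counting scan by a single forward pass keeping a stack of
-- indices of unmatched '(' (the final ')' matches the stack top); objective: alternative/idiomatic.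

-- ===== PORT A =====
-- A's backward for-loop: indices from range(len(text)-1, -1, -1), accumulator `depth`
def pvAGo (t : List Char) : List Int → Int → String × Option String
  | [], _ => (String.ofList t, none)
  | i :: rest, depth =>
    match PySem.List.pyGet? t i with
    | none => (String.ofList t, none)   -- unreachable: every index produced by the range is valid
    | some c =>
      if c = ')' then pvAGo t rest (depth + 1)
      else if c = '(' then
        if depth - 1 = 0 then
          (String.ofList (PySem.Chars.strip (PySem.List.slice t none (some i))),
           some (String.ofList (PySem.Chars.strip (PySem.List.slice t (some (i + 1)) (some (-1))))))
        else pvAGo t rest (depth - 1)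
      else pvAGo t rest depth

def extract_trailing_parenthetical (text : String) : String × Option String :=
  let t := PySem.Chars.strip text.toList
  if PySem.Chars.endswith t [')'] then
    pvAGo t (PySem.List.pyRange ((t.length : Int) - 1) (-1) (-1)) 0
  else (String.ofList t, none)

-- ===== PORT B =====
-- one step of B's forward loop: push the index on '(', pop on ')' if nonempty (tail [] = [])
def pvStackStep (s : List Int) (p : Int × Char) : List Int :=
  if p.2 = '(' then p.1 :: s
  else if p.2 = ')' then s.tail
  else s

def extract_trailing_parenthetical_alt (text : String) : String × Option String :=
  let t := PySem.Chars.strip text.toList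
  if PySem.Chars.endswith t [')'] then
    let stack := (PySem.List.enumerate (PySem.List.slice t none (some (-1)))).foldl pvStackStep []
    match stack with
    | [] => (String.ofList t, none)
    | i :: _ =>
        (String.ofList (PySem.Chars.strip (PySem.List.slice t none (some i))),
         some (String.ofList (PySem.Chars.strip (PySem.List.slice t (some (i + 1)) (some (-1))))))
  else (String.ofList t, none)

-- ===== PRECONDITION & SPEC =====
def Spec_extract_trailing_parenthetical (text : String) (out : String × Option String) : Prop := out = extract_trailing_parenthetical_alt text
instance (text : String) (out : String × Option String) : Decidable (Spec_extract_trailing_parenthetical text out) := by unfold Spec_extract_trailing_parenthetical; infer_instance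

-- ===== CLAIM (what is proved, stated in full; the proofs are below) =====
def Claim_equal_extract_trailing_parenthetical : Prop := ∀ (text : String), Dom_extract_trailing_parenthetical text → Spec_extract_trailing_parenthetical text (extract_trailing_parenthetical text)

-- ===== LEMMAS AND PROOFS =====

-- balance of a char list: #')' − #'('
def pvBal (s : List Char) : Int := (s.countP (· == ')') : Int) - (s.countP (· == '(') : Int)

def pvDelta (c : Char) : Int := if c = ')' then 1 else if c = '(' then -1 else 0

-- the condition at which A's backward scan stops, at index i of t
def pvCond (t : List Char) (i : Nat) : Prop := t[i]? = some '(' ∧ pvBal (t.drop i) = 0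

-- largest index < n satisfying pvCond (what the backward scan finds)
def pvFind (t : List Char) : Nat → Option Nat
  | 0 => none
  | n + 1 => if t[n]? = some '(' ∧ pvBal (t.drop n) = 0 then some n else pvFind t n

-- the stack B's loop has built after the whole prefix l
def pvStackOf (l : List Char) : List Int := (PySem.List.enumerate l).foldl pvStackStep []

lemma pvStackStep_open (s : List Int) (i : Int) : pvStackStep s (i, '(') = i :: s := by
  simp [pvStackStep]

lemma pvStackStep_close (s : List Int) (i : Int) : pvStackStep s (i, ')') = s.tail := by
  simp [pvStackStep]

lemma pvStackStep_other (s : List Int) (i : Int) (c : Char) (h1 : ¬ c = '(') (h2 : ¬ c = ')') :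
    pvStackStep s (i, c) = s := by
  simp [pvStackStep, h1, h2]

lemma pvBal_cons (c : Char) (s : List Char) : pvBal (c :: s) = pvDelta c + pvBal s := by
  simp only [pvBal, pvDelta, List.countP_cons]
  by_cases h1 : c = ')' <;> by_cases h2 : c = '(' <;> simp_all <;> omega

lemma pvBal_append_singleton (s : List Char) (c : Char) :
    pvBal (s ++ [c]) = pvBal s + pvDelta c := by
  simp only [pvBal, pvDelta, List.countP_append, List.countP_singleton]
  by_cases h1 : c = ')' <;> by_cases h2 : c = '(' <;> simp_all <;> omega

lemma pvBal_drop (t : List Char) (m : Nat) (hm : m < t.length) :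
    pvBal (t.drop m) = pvDelta t[m] + pvBal (t.drop (m + 1)) := by
  rw [List.drop_eq_getElem_cons hm, pvBal_cons]

lemma pvStackOf_append_singleton (l : List Char) (c : Char) :
    pvStackOf (l ++ [c]) = pvStackStep (pvStackOf l) ((l.length : Int), c) := by
  simp only [pvStackOf, PySem.List.enumerate_append, List.foldl_append]
  simp [PySem.List.enumerate]

lemma pvRange_desc (n : Nat) :
    PySem.List.pyRange ((n : Int) - 1) (-1) (-1) =
      (List.range n).reverse.map (fun k : Nat => (k : Int)) := by
  have hr : (List.range n).reverse.map (fun k : Nat => (k : Int)) =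
      (List.range n).map (fun k : Nat => (n : Int) - 1 + (-1) * k) := by
    rw [List.range_eq_range', List.reverse_range', List.map_map, ← List.range_eq_range']
    apply List.map_congr_left
    intro k hk
    simp only [List.mem_range] at hk
    simp only [Function.comp]
    omega
  rw [hr]
  simp only [PySem.List.pyRange]
  rcases Nat.eq_zero_or_pos n with h | h
  · subst h; decide
  · have h1 : (-1 : Int) < (n : Int) - 1 := by omega
    simp only [if_neg (by norm_num : ¬ (-1:Int) = 0), if_neg (by norm_num : ¬ (0:Int) < -1), if_pos h1]
    have h2 : (((n:Int) - 1 - -1 + - -1 - 1) / - -1).toNat = n := by norm_num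
    rw [h2]

-- A's backward scan started at index n−1 with accumulator pvBal (t.drop n) stops at the
-- largest index < n satisfying pvCond
lemma pvAGo_spec (t : List Char) (n : Nat) (hn : n ≤ t.length) :
    pvAGo t ((List.range n).reverse.map (fun k : Nat => (k : Int))) (pvBal (t.drop n)) =
      match pvFind t n with
      | some i =>
          (String.ofList (PySem.Chars.strip (PySem.List.slice t none (some (i : Int)))),
           some (String.ofList (PySem.Chars.strip (PySem.List.slice t (some ((i : Int) + 1)) (some (-1))))))
      | none => (String.ofList t, none) := by
  induction n with
  | zero => simp [pvAGo, pvFind]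
  | succ m ih =>
    have hm : m < t.length := hn
    have hcons : ((List.range (m+1)).reverse.map (fun k : Nat => (k : Int))) =
        (m : Int) :: (List.range m).reverse.map (fun k : Nat => (k : Int)) := by
      rw [List.range_succ]; simp
    rw [hcons]
    have hget : PySem.List.pyGet? t (m : Int) = some t[m] := by
      rw [PySem.List.pyGet?_natCast, List.getElem?_eq_getElem hm]
    simp only [pvAGo, hget]
    have hbal := pvBal_drop t m hm
    by_cases h1 : t[m] = ')'
    · rw [if_pos h1]
      have : pvBal (t.drop (m+1)) + 1 = pvBal (t.drop m) := by
        rw [hbal, h1]; simp [pvDelta]; omega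
      rw [this]
      have hnc : ¬ (t[m]? = some '(' ∧ pvBal (t.drop m) = 0) := by
        intro ⟨hc, _⟩
        rw [List.getElem?_eq_getElem hm] at hc
        simp_all
      rw [ih (le_of_lt hm)]
      simp only [pvFind, if_neg hnc]
    · rw [if_neg h1]
      by_cases h2 : t[m] = '('
      · rw [if_pos h2]
        have hd : pvBal (t.drop (m+1)) - 1 = pvBal (t.drop m) := by
          rw [hbal, h2]; simp [pvDelta]; omega
        rw [hd]
        by_cases h3 : pvBal (t.drop m) = 0
        · rw [if_pos h3]
          have hc : t[m]? = some '(' ∧ pvBal (t.drop m) = 0 := ⟨by rw [List.getElem?_eq_getElem hm, h2], h3⟩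
          simp only [pvFind, if_pos hc]
        · rw [if_neg h3]
          have hnc : ¬ (t[m]? = some '(' ∧ pvBal (t.drop m) = 0) := fun ⟨_, hb⟩ => h3 hb
          rw [ih (le_of_lt hm)]
          simp only [pvFind, if_neg hnc]
      · rw [if_neg h2]
        have : pvBal (t.drop (m+1)) = pvBal (t.drop m) := by
          rw [hbal]; simp only [pvDelta, if_neg h1, if_neg h2]; omega
        rw [this]
        have hnc : ¬ (t[m]? = some '(' ∧ pvBal (t.drop m) = 0) := by
          intro ⟨hc, _⟩
          rw [List.getElem?_eq_getElem hm] at hc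
          exact h2 (Option.some.inj hc)
        rw [ih (le_of_lt hm)]
        simp only [pvFind, if_neg hnc]

lemma pvFind_eq_none (t : List Char) (n : Nat) (h : ∀ i, i < n → ¬ pvCond t i) :
    pvFind t n = none := by
  induction n with
  | zero => rfl
  | succ m ih =>
    have hm' : ¬ (t[m]? = some '(' ∧ pvBal (t.drop m) = 0) := h m (Nat.lt_succ_self m)
    simp only [pvFind, if_neg hm']
    exact ih fun i hi => h i (Nat.lt_succ_of_lt hi)

lemma pvFind_eq_some (t : List Char) (n j : Nat) (hj : j < n) (hc : pvCond t j)
    (h : ∀ i, j < i → i < n → ¬ pvCond t i) : pvFind t n = some j := by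
  induction n with
  | zero => omega
  | succ m ih =>
    by_cases hm : j = m
    · subst hm
      have hc' : t[j]? = some '(' ∧ pvBal (t.drop j) = 0 := hc
      simp only [pvFind, if_pos hc']
    · have hm' : ¬ (t[m]? = some '(' ∧ pvBal (t.drop m) = 0) := h m (by omega) (Nat.lt_succ_self m)
      simp only [pvFind, if_neg hm']
      exact ih (by omega) fun i h1 h2 => h i h1 (Nat.lt_succ_of_lt h2)

-- the invariant of B's forward pass: the stack holds (in decreasing order) exactly the
-- unmatched '(' positions, and it determines the suffix balances A's scan inspects
lemma pvStack_inv (l : List Char) :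
    (∀ j ∈ pvStackOf l, 0 ≤ j ∧ j.toNat < l.length ∧ l[j.toNat]? = some '(') ∧
    (pvStackOf l).Pairwise (fun a b => b < a) ∧
    (∀ j ∈ pvStackOf l,
      pvBal (l.drop j.toNat) = -(1 + ((pvStackOf l).countP (fun x => decide (j < x)) : Int))) ∧
    (∀ i : Nat, i < l.length → l[i]? = some '(' → (i : Int) ∉ pvStackOf l →
      -(((pvStackOf l).countP (fun x => decide ((i : Int) < x))) : Int) ≤ pvBal (l.drop i)) := by
  induction l using List.reverseRecOn with
  | nil =>
    refine ⟨?_, ?_, ?_, ?_⟩ <;> simp [pvStackOf, PySem.List.enumerate]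
  | append_singleton l c ih =>
    obtain ⟨inv1, inv2, inv3, inv4⟩ := ih
    have hso := pvStackOf_append_singleton l c
    have hbal : ∀ i : Nat, i ≤ l.length →
        pvBal ((l ++ [c]).drop i) = pvBal (l.drop i) + pvDelta c := by
      intro i hi
      rw [List.drop_append_of_le_length hi, pvBal_append_singleton]
    have hgetlt : ∀ i : Nat, i < l.length → (l ++ [c])[i]? = l[i]? :=
      fun i hi => List.getElem?_append_left hi
    have hgetn : (l ++ [c])[l.length]? = some c := List.getElem?_concat_length
    have hlen : (l ++ [c]).length = l.length + 1 := by simp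
    by_cases h1 : c = '('
    · -- push
      subst h1
      rw [hso, pvStackStep_open]
      refine ⟨?_, ?_, ?_, ?_⟩
      · intro j hj
        rcases List.mem_cons.mp hj with rfl | hj'
        · exact ⟨Int.natCast_nonneg _, by rw [Int.toNat_natCast]; omega, by rw [Int.toNat_natCast]; exact hgetn⟩
        · obtain ⟨ha, hb, hc⟩ := inv1 j hj'
          exact ⟨ha, by omega, by rw [hgetlt _ hb]; exact hc⟩
      · refine List.Pairwise.cons ?_ inv2
        intro j hj
        obtain ⟨ha, hb, _⟩ := inv1 j hj
        omega
      · intro j hj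
        rcases List.mem_cons.mp hj with rfl | hj'
        · rw [Int.toNat_natCast, hbal _ le_rfl]
          have h0 : pvBal (l.drop l.length) = 0 := by
            rw [List.drop_length]; rfl
          have hcnt : ((l.length : Int) :: pvStackOf l).countP
              (fun x => decide ((l.length : Int) < x)) = 0 := by
            rw [List.countP_eq_zero]
            intro x hx
            rcases List.mem_cons.mp hx with rfl | hx'
            · simp
            · obtain ⟨ha, hb, _⟩ := inv1 x hx'
              simp only [decide_eq_true_eq]; omega
          rw [h0, hcnt]
          simp [pvDelta]
        · obtain ⟨ha, hb, _⟩ := inv1 j hj'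
          rw [hbal _ (le_of_lt hb), inv3 j hj']
          rw [List.countP_cons]
          simp only [decide_eq_true_eq]
          rw [if_pos (by omega : j < (l.length : Int))]
          simp only [pvDelta, if_neg (by decide : ¬ ('(' = ')'))]
          push_cast
          ring
      · intro i hi hgi hni
        have hin : i < l.length := by
          rcases Nat.lt_succ_iff_lt_or_eq.mp (by omega : i < l.length + 1) with h | h
          · exact h
          · exact absurd (by rw [h]; exact List.mem_cons_self ..) hni
        have hni' : (i : Int) ∉ pvStackOf l := fun h => hni (List.mem_cons_of_mem _ h)
        have h4 := inv4 i hin (by rw [hgetlt _ hin] at hgi; exact hgi) hni'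
        rw [hbal _ (le_of_lt hin)]
        rw [List.countP_cons]
        simp only [decide_eq_true_eq]
        rw [if_pos (by omega : (i : Int) < (l.length : Int))]
        simp only [pvDelta, if_neg (by decide : ¬ ('(' = ')'))]
        push_cast at h4 ⊢
        omega
    · by_cases h2 : c = ')'
      · -- pop
        subst h2
        rw [hso, pvStackStep_close]
        have hdel : pvDelta ')' = 1 := by decide
        cases hS1 : pvStackOf l with
        | nil =>
          simp only [List.tail_nil]
          refine ⟨by simp, by simp, by simp, ?_⟩
          intro i hi hgi _
          have hin : i < l.length := by
            rcases Nat.lt_succ_iff_lt_or_eq.mp (by omega : i < l.length + 1) with h | h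
            · exact h
            · rw [h, hgetn] at hgi
              exact absurd (Option.some.inj hgi) h1
          have h4 := inv4 i hin (by rw [hgetlt _ hin] at hgi; exact hgi) (by rw [hS1]; simp)
          rw [hS1] at h4
          rw [hbal _ (le_of_lt hin), hdel]
          simp only [List.countP_nil] at h4 ⊢
          omega
        | cons j0 S1 =>
          simp only [List.tail_cons]
          have hmem0 : ∀ x ∈ S1, x ∈ pvStackOf l := by
            intro x hx; rw [hS1]; exact List.mem_cons_of_mem _ hx
          have hlt0 : ∀ x ∈ S1, x < j0 := by
            have h := inv2; rw [hS1] at h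
            exact fun x hx => List.rel_of_pairwise_cons h hx
          refine ⟨?_, ?_, ?_, ?_⟩
          · intro j hj
            obtain ⟨ha, hb, hc⟩ := inv1 j (hmem0 j hj)
            exact ⟨ha, by omega, by rw [hgetlt _ hb]; exact hc⟩
          · have h := inv2; rw [hS1] at h; exact h.tail
          · intro j hj
            obtain ⟨ha, hb, _⟩ := inv1 j (hmem0 j hj)
            have h3 := inv3 j (hmem0 j hj)
            rw [hS1, List.countP_cons] at h3
            simp only [decide_eq_true_eq] at h3
            rw [if_pos (hlt0 j hj)] at h3
            rw [hbal _ (le_of_lt hb), h3, hdel]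
            push_cast
            ring
          · intro i hi hgi hni
            have hin : i < l.length := by
              rcases Nat.lt_succ_iff_lt_or_eq.mp (by omega : i < l.length + 1) with h | h
              · exact h
              · rw [h, hgetn] at hgi
                exact absurd (Option.some.inj hgi) h1
            rw [hbal _ (le_of_lt hin), hdel]
            by_cases hij : (i : Int) = j0
            · have h3 := inv3 j0 (by rw [hS1]; exact List.mem_cons_self ..)
              rw [hS1, List.countP_cons] at h3
              simp only [decide_eq_true_eq] at h3
              rw [if_neg (by omega : ¬ j0 < j0)] at h3
              have hj0nn : 0 ≤ j0 := (inv1 j0 (by rw [hS1]; exact List.mem_cons_self ..)).1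
              have htn : j0.toNat = i := by omega
              rw [htn] at h3
              rw [h3]
              have hcnt0 : S1.countP (fun x => decide (j0 < x)) = 0 := by
                rw [List.countP_eq_zero]
                intro x hx
                have := hlt0 x hx
                simp only [decide_eq_true_eq]; omega
              rw [hcnt0] at h3 ⊢
              have hle : (0:Int) ≤ (S1.countP (fun x => decide ((i:Int) < x)) : Int) :=
                Int.natCast_nonneg _
              omega
            · have hni2 : (i : Int) ∉ pvStackOf l := by
                rw [hS1]
                intro hmem
                rcases List.mem_cons.mp hmem with h | h
                · exact hij h
                · exact hni h
              have h4 := inv4 i hin (by rw [hgetlt _ hin] at hgi; exact hgi) hni2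
              rw [hS1, List.countP_cons] at h4
              simp only [decide_eq_true_eq] at h4
              by_cases hj0 : (i:Int) < j0
              · rw [if_pos hj0] at h4; push_cast at h4 ⊢; omega
              · rw [if_neg hj0] at h4; push_cast at h4 ⊢; omega
      · -- other char
        rw [hso, pvStackStep_other _ _ _ h1 h2]
        have hdel : pvDelta c = 0 := by simp [pvDelta, h1, h2]
        refine ⟨?_, inv2, ?_, ?_⟩
        · intro j hj
          obtain ⟨ha, hb, hc⟩ := inv1 j hj
          exact ⟨ha, by omega, by rw [hgetlt _ hb]; exact hc⟩
        · intro j hj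
          obtain ⟨_, hb, _⟩ := inv1 j hj
          rw [hbal _ (le_of_lt hb), hdel, inv3 j hj]
          ring
        · intro i hi hgi hni
          have hin : i < l.length := by
            rcases Nat.lt_succ_iff_lt_or_eq.mp (by omega : i < l.length + 1) with h | h
            · exact h
            · rw [h, hgetn] at hgi
              exact absurd (Option.some.inj hgi) h1
          have h4 := inv4 i hin (by rw [hgetlt _ hin] at hgi; exact hgi) hni
          rw [hbal _ (le_of_lt hin), hdel]
          omega

-- core: on a string ending in ')', A's backward scan and B's stack agree
lemma pvMain (t : List Char) (l : List Char) (ht : t = l ++ [')']) :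
    pvAGo t (PySem.List.pyRange ((t.length : Int) - 1) (-1) (-1)) 0 =
      match pvStackOf l with
      | [] => (String.ofList t, none)
      | i :: _ =>
          (String.ofList (PySem.Chars.strip (PySem.List.slice t none (some i))),
           some (String.ofList (PySem.Chars.strip (PySem.List.slice t (some (i + 1)) (some (-1)))))) := by
  obtain ⟨inv1, inv2, inv3, inv4⟩ := pvStack_inv l
  have hlen : t.length = l.length + 1 := by rw [ht]; simp
  have hgetlt : ∀ i : Nat, i < l.length → t[i]? = l[i]? := by
    intro i hi; rw [ht]; exact List.getElem?_append_left hi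
  have hgetn : t[l.length]? = some ')' := by rw [ht]; exact List.getElem?_concat_length
  have hbal : ∀ i : Nat, i ≤ l.length → pvBal (t.drop i) = pvBal (l.drop i) + 1 := by
    intro i hi
    rw [ht, List.drop_append_of_le_length hi, pvBal_append_singleton]
    rfl
  have h0 : pvBal (t.drop t.length) = 0 := by rw [List.drop_length]; rfl
  have hspec := pvAGo_spec t t.length le_rfl
  rw [h0] at hspec
  rw [pvRange_desc t.length, hspec]
  cases hS : pvStackOf l with
  | nil =>
    have hnone : pvFind t t.length = none := by
      apply pvFind_eq_none
      intro i hi ⟨hc1, hc2⟩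
      rcases Nat.lt_succ_iff_lt_or_eq.mp (by omega : i < l.length + 1) with h | h
      · rw [hgetlt i h] at hc1
        have h4 := inv4 i h hc1 (by rw [hS]; simp)
        rw [hS] at h4
        simp only [List.countP_nil] at h4
        rw [hbal i (le_of_lt h)] at hc2
        omega
      · rw [h, hgetn] at hc1
        exact absurd (Option.some.inj hc1) (by decide)
    rw [hnone]
  | cons j0 S1 =>
    have hj0 := inv1 j0 (by rw [hS]; exact List.mem_cons_self ..)
    obtain ⟨hj0nn, hj0lt, hj0get⟩ := hj0
    have hlt0 : ∀ x ∈ S1, x < j0 := by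
      have h := inv2; rw [hS] at h
      exact fun x hx => List.rel_of_pairwise_cons h hx
    have hcond : pvCond t j0.toNat := by
      refine ⟨by rw [hgetlt _ hj0lt]; exact hj0get, ?_⟩
      have h3 := inv3 j0 (by rw [hS]; exact List.mem_cons_self ..)
      have hcnt : (pvStackOf l).countP (fun x => decide (j0 < x)) = 0 := by
        rw [hS, List.countP_eq_zero]
        intro x hx
        rcases List.mem_cons.mp hx with rfl | hx'
        · simp
        · have := hlt0 x hx'
          simp only [decide_eq_true_eq]; omega
      rw [hcnt] at h3
      rw [hbal _ (le_of_lt hj0lt), h3]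
      norm_num
    have hnot : ∀ i, j0.toNat < i → i < t.length → ¬ pvCond t i := by
      intro i hgt hi ⟨hc1, hc2⟩
      rcases Nat.lt_succ_iff_lt_or_eq.mp (by omega : i < l.length + 1) with h | h
      · rw [hgetlt i h] at hc1
        have hni : (i : Int) ∉ pvStackOf l := by
          rw [hS]
          intro hmem
          rcases List.mem_cons.mp hmem with heq | hmem'
          · omega
          · have := hlt0 _ hmem'; omega
        have h4 := inv4 i h hc1 hni
        have hcnt : (pvStackOf l).countP (fun x => decide ((i:Int) < x)) = 0 := by
          rw [hS, List.countP_eq_zero]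
          intro x hx
          rcases List.mem_cons.mp hx with rfl | hx'
          · simp only [decide_eq_true_eq]; omega
          · have := hlt0 x hx'
            simp only [decide_eq_true_eq]; omega
        rw [hcnt] at h4
        rw [hbal i (le_of_lt h)] at hc2
        simp only [Nat.cast_zero, neg_zero] at h4
        omega
      · rw [h, hgetn] at hc1
        exact absurd (Option.some.inj hc1) (by decide)
    have hsome : pvFind t t.length = some j0.toNat := by
      apply pvFind_eq_some t t.length j0.toNat (by omega) hcond hnot
    rw [hsome]
    have hcast : ((j0.toNat : Nat) : Int) = j0 := Int.toNat_of_nonneg hj0nn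
    simp only [hcast]

-- ===== VERDICT (by name: the statement is the Claim_ definition above) =====
theorem extract_trailing_parenthetical_spec : Claim_equal_extract_trailing_parenthetical := by
  intro text _
  unfold Spec_extract_trailing_parenthetical
  unfold extract_trailing_parenthetical extract_trailing_parenthetical_alt
  by_cases h : PySem.Chars.endswith (PySem.Chars.strip text.toList) [')'] = true
  · simp only [h, if_true]
    obtain ⟨l, hl⟩ := (PySem.Chars.endswith_iff _ _).mp h
    have ht : PySem.Chars.strip text.toList = l ++ [')'] := hl.symm
    rw [pvMain _ l ht]
    rw [PySem.List.slice_to_neg_one, ht]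
    simp only [List.dropLast_concat]
    rfl
  · simp only [Bool.not_eq_true] at h
    simp only [h, Bool.false_eq_true, if_false]
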